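-- pv_equiv track=rewrite | github.com/rrmata13/skills-db | tools/matcher.py | _field_match_strength
-- ===== SOURCE A (Python) =====
-- from typing import Iterable, Mapping, Sequence
--
-- def _field_match_strength(qt: str, qt_next: str | None, field_tokens: Sequence[str]) -> int:
--     """SOL-990 AI-1 + AI-2 — Python mirror of fieldMatchStrength in scoring.ts.
--
--     Returns numeric match strength so the caller can weight per-(field, type)
--     per Codex R5 Q2 (name/slug phrase > scattered description).
--
--     Strength values:
--         3 = ordered phrase/bigram (qt, qt_next adjacent in field_tokens)
--         2 = exact token equality
--         1 = safe prefix/stem — only when BOTH tokens length >= 4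
--         0 = no match
--
--     Replaces the previous ``qt in ft or ft in qt`` bidirectional substring rule.
--     """
--     # 3 = ordered phrase/bigram (strongest)
--     if qt_next is not None:
--         for j in range(len(field_tokens) - 1):
--             if field_tokens[j] == qt and field_tokens[j + 1] == qt_next:
--                 return 3
--     # 2 = exact token equality
--     if qt in field_tokens:
--         return 2
--     # 1 = safe prefix/stem (length >= 4 on both sides)
--     if len(qt) >= 4:
--         for ft in field_tokens:
--             if len(ft) >= 4 and (ft.startswith(qt) or qt.startswith(ft)):
--                 return 1
--     return 0
-- ===== SOURCE B (Python) =====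
-- def _field_match_strength(qt, qt_next, field_tokens):
--     """Single fused pass maintaining three flags, then one priority return."""
--     found_bigram = found_exact = found_prefix = False
--     n = len(field_tokens)
--     for j in range(n):
--         tok = field_tokens[j]
--         if qt_next is not None and j + 1 < n and tok == qt and field_tokens[j + 1] == qt_next:
--             found_bigram = True
--         if tok == qt:
--             found_exact = True
--         if len(qt) >= 4 and len(tok) >= 4 and (tok.startswith(qt) or qt.startswith(tok)):
--             found_prefix = True
--     return 3 if found_bigram else 2 if found_exact else 1 if found_prefix else 0
-- ===== Notes on version B (the rewrite author's own statement) =====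
-- stated objective: alternative
-- what changed: Replaces A's three separate early-return scans (bigram index loop, membership test, prefix loop) with one fused pass over indices that maintains three boolean flags and decides the strength once at the end.
import Mathlib
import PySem

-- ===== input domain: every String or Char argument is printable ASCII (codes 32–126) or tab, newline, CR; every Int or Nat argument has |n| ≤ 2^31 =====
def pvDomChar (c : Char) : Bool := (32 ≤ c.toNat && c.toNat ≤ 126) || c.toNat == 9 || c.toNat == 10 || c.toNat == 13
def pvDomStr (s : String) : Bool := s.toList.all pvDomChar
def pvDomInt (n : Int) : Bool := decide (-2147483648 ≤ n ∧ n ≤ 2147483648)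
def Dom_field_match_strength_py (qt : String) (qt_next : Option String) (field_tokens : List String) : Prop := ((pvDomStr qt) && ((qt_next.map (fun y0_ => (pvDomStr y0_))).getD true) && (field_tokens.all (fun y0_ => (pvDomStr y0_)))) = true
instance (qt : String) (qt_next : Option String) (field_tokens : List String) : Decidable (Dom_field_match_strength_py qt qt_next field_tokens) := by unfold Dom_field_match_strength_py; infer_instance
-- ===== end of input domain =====

-- B fuses A's three early-return scans into one pass keeping three flags; same cost, different decomposition (objective: alternative).

-- ===== PORT A =====
-- A: three sequential scans, each returning early: bigram loop over range(len-1), membership test, prefix loop.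
def field_match_strength_py (qt : String) (qt_next : Option String) (field_tokens : List String) : Int :=
  let bigram : Bool :=
    match qt_next with
    | none => false
    | some nxt =>
      (PySem.List.pyRange 0 (PySem.List.len field_tokens - 1) 1).any (fun j =>
        PySem.List.pyGetD field_tokens j "" == qt && PySem.List.pyGetD field_tokens (j + 1) "" == nxt)
  if bigram then 3
  else if field_tokens.contains qt then 2
  else if 4 ≤ PySem.Str.len qt then
    if field_tokens.any (fun ft =>
        decide (4 ≤ PySem.Str.len ft) && (PySem.Str.startswith ft qt || PySem.Str.startswith qt ft))
    then 1 else 0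
  else 0

-- ===== PORT B =====
-- B: one fold over all indices maintaining (found_bigram, found_exact, found_prefix), then one priority return.
def field_match_strength_py_alt (qt : String) (qt_next : Option String) (field_tokens : List String) : Int :=
  let n : Int := PySem.List.len field_tokens
  let flags : Bool × Bool × Bool :=
    (PySem.List.pyRange 0 n 1).foldl (fun (acc : Bool × Bool × Bool) j =>
      (acc.1 || (qt_next.isSome && decide (j + 1 < n) && (PySem.List.pyGetD field_tokens j "" == qt)
                 && (some (PySem.List.pyGetD field_tokens (j + 1) "") == qt_next)),
       acc.2.1 || (PySem.List.pyGetD field_tokens j "" == qt),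
       acc.2.2 || (decide (4 ≤ PySem.Str.len qt) && decide (4 ≤ PySem.Str.len (PySem.List.pyGetD field_tokens j ""))
                   && (PySem.Str.startswith (PySem.List.pyGetD field_tokens j "") qt
                       || PySem.Str.startswith qt (PySem.List.pyGetD field_tokens j "")))))
      (false, false, false)
  if flags.1 then 3 else if flags.2.1 then 2 else if flags.2.2 then 1 else 0

-- ===== PRECONDITION & SPEC =====
def Spec_field_match_strength_py (qt : String) (qt_next : Option String) (field_tokens : List String) (out : Int) : Prop := out = field_match_strength_py_alt qt qt_next field_tokens
instance (qt : String) (qt_next : Option String) (field_tokens : List String) (out : Int) : Decidable (Spec_field_match_strength_py qt qt_next field_tokens out) := by unfold Spec_field_match_strength_py; infer_instance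

-- ===== CLAIM (what is proved, stated in full; the proofs are below) =====
def Claim_equal_field_match_strength_py : Prop := ∀ (qt : String) (qt_next : Option String) (field_tokens : List String), Dom_field_match_strength_py qt qt_next field_tokens → Spec_field_match_strength_py qt qt_next field_tokens (field_match_strength_py qt qt_next field_tokens)

-- ===== LEMMAS AND PROOFS =====

-- a fold that only ORs three flags computes the three `any`s
theorem pv_foldl_or3 {α : Type} (p q r : α → Bool) :
    ∀ (L : List α) (a b c : Bool),
      L.foldl (fun acc x => (acc.1 || p x, acc.2.1 || q x, acc.2.2 || r x)) (a, b, c)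
        = (a || L.any p, b || L.any q, c || L.any r) := by
  intro L
  induction L with
  | nil => intro a b c; simp
  | cons x xs ih =>
    intro a b c
    simp only [List.foldl, List.any_cons, ih, Bool.or_assoc]

-- any over all indices with a 'j+1 < n' guard = any over range(n-1)
theorem pv_any_range_guard (n : Int) (p : Int → Bool) :
    (PySem.List.pyRange 0 n 1).any (fun j => decide (j + 1 < n) && p j)
      = (PySem.List.pyRange 0 (n - 1) 1).any p := by
  rw [Bool.eq_iff_iff]
  simp only [List.any_eq_true, PySem.List.mem_pyRange_one, Bool.and_eq_true, decide_eq_true_eq]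
  constructor
  · rintro ⟨j, ⟨h0, h1⟩, h2, hp⟩
    exact ⟨j, ⟨h0, by omega⟩, hp⟩
  · rintro ⟨j, ⟨h0, h1⟩, hp⟩
    exact ⟨j, ⟨h0, by omega⟩, by omega, hp⟩

-- any over all indices of xs of a predicate on xs[j] = any over xs
theorem pv_any_range_getD {α : Type} (xs : List α) (d : α) (p : α → Bool) :
    (PySem.List.pyRange 0 (PySem.List.len xs) 1).any (fun j => p (PySem.List.pyGetD xs j d))
      = xs.any p := by
  rw [PySem.List.len_eq]
  have h := PySem.List.map_pyGetD_pyRange_zero' (xs := xs) (d := d)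
  calc (PySem.List.pyRange 0 (xs.length : Int) 1).any (fun j => p (PySem.List.pyGetD xs j d))
      = ((PySem.List.pyRange 0 (xs.length : Int) 1).map (fun j => PySem.List.pyGetD xs j d)).any p := by
        rw [List.any_map]; rfl
    _ = xs.any p := by rw [h]

-- any of a constantly-false predicate
theorem pv_any_false {α : Type} (L : List α) : (L.any (fun _ => false)) = false := by simp

-- a constant conjunct factors out of any
theorem pv_any_const_and {α : Type} (c : Bool) (p : α → Bool) (L : List α) :
    L.any (fun x => c && p x) = (c && L.any p) := by
  cases c <;> simp

-- ===== VERDICT (by name: the statement is the Claim_ definition above) =====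
theorem field_match_strength_py_spec : Claim_equal_field_match_strength_py := by
  intro qt qt_next field_tokens _
  unfold Spec_field_match_strength_py field_match_strength_py field_match_strength_py_alt
  simp only [pv_foldl_or3, Bool.false_or]
  cases qt_next with
  | none =>
    simp only [Option.isSome_none, Bool.false_and, Bool.and_assoc]
    rw [pv_any_false,
        pv_any_range_getD field_tokens "" (fun tok => tok == qt),
        pv_any_range_getD field_tokens "" (fun tok =>
          decide (4 ≤ PySem.Str.len qt) && (decide (4 ≤ PySem.Str.len tok)
            && (PySem.Str.startswith tok qt || PySem.Str.startswith qt tok))),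
        pv_any_const_and (decide (4 ≤ PySem.Str.len qt))
          (fun tok => decide (4 ≤ PySem.Str.len tok)
            && (PySem.Str.startswith tok qt || PySem.Str.startswith qt tok)) field_tokens,
        List.any_beq']
    by_cases hq : 4 ≤ PySem.Str.len qt <;>
      cases hc : field_tokens.contains qt <;>
      cases hp : field_tokens.any (fun ft =>
        decide (4 ≤ PySem.Str.len ft) && (PySem.Str.startswith ft qt || PySem.Str.startswith qt ft)) <;>
      simp_all [PySem.Str.len_eq]
  | some nxt =>
    simp only [Option.isSome_some, Bool.true_and, Bool.and_assoc]
    rw [pv_any_range_guard (PySem.List.len field_tokens) (fun j =>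
          PySem.List.pyGetD field_tokens j "" == qt
            && (some (PySem.List.pyGetD field_tokens (j + 1) "") == some nxt)),
        pv_any_range_getD field_tokens "" (fun tok => tok == qt),
        pv_any_range_getD field_tokens "" (fun tok =>
          decide (4 ≤ PySem.Str.len qt) && (decide (4 ≤ PySem.Str.len tok)
            && (PySem.Str.startswith tok qt || PySem.Str.startswith qt tok))),
        pv_any_const_and (decide (4 ≤ PySem.Str.len qt))
          (fun tok => decide (4 ≤ PySem.Str.len tok)
            && (PySem.Str.startswith tok qt || PySem.Str.startswith qt tok)) field_tokens,
        List.any_beq']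
    by_cases hq : 4 ≤ PySem.Str.len qt <;>
      cases hb : (PySem.List.pyRange 0 (PySem.List.len field_tokens - 1) 1).any (fun j =>
          PySem.List.pyGetD field_tokens j "" == qt
            && (some (PySem.List.pyGetD field_tokens (j + 1) "") == some nxt)) <;>
      cases hc : field_tokens.contains qt <;>
      cases hp : field_tokens.any (fun ft =>
          decide (4 ≤ PySem.Str.len ft) && (PySem.Str.startswith ft qt || PySem.Str.startswith qt ft)) <;>
      simp_all [PySem.Str.len_eq]
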